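-- pv_equiv track=rewrite | github.com/nakixii/homo | system/bin/parsescripts/config/field_0x2200017/gas/global_variable/gcomm_global_status.py | get_gcomm_l2_state
-- ===== SOURCE A (Python) =====
-- MACRO_GCOMM_FSM_L2_FDD_MEAS_INDEX = 0x3
--
-- MACRO_GCOMM_FSM_L2_TDD_MEAS_INDEX = 0x2
--
-- MACRO_GCOMM_FSM_L2_STATUS_BUTT_INDEX = 0xFF
--
-- GAS_GCOMM_L2_STATE_ENUM_TABLE = {
--     0x21: "GAS_GCOMM_L2_STATE_LTE_IDLE_MEAS_WAIT_LRRC_MEAS_CNF",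
--     0x22: "GAS_GCOMM_L2_STATE_LTE_IDLE_MEAS_WAIT_GPHY_MEAS_CNF",
--     0x23: "GAS_GCOMM_L2_STATE_LTE_IDLE_MEAS_WAIT_LRRC_MEAS_IND",
--     0x24: "GAS_GCOMM_L2_STATE_LTE_IDLE_MEAS_WAIT_MEAS_PT_EXP",
--     0x25: "GAS_GCOMM_L2_STATE_LTE_IDLE_MEAS_WAIT_GPHY_STOP_MEAS_CNF",
--     0x26: "GAS_GCOMM_L2_STATE_LTE_IDLE_MEAS_WAIT_LRRC_STOP_MEAS_CNF",
--     0x31: "GAS_GCOMM_L2_STATE_LTE_CONNECT_MEAS_WAIT_LRRC_MEAS_CNF",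
--     0x32: "GAS_GCOMM_L2_STATE_LTE_CONNECT_MEAS_WAIT_GPHY_MEAS_CNF",
--     0x33: "GAS_GCOMM_L2_STATE_LTE_CONNECT_MEAS_WAIT_LRRC_MEAS_IND",
--     0x34: "GAS_GCOMM_L2_STATE_LTE_CONNECT_MEAS_WAIT_MEAS_PT_EXP",
--     0x35: "GAS_GCOMM_L2_STATE_LTE_CONNECT_MEAS_WAIT_GPHY_STOP_MEAS_CNF",
--     0x36: "GAS_GCOMM_L2_STATE_LTE_CONNECT_MEAS_WAIT_LRRC_STOP_MEAS_CNF",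
--     0xFE: "GAS_GCOMM_L2_STATE_INIT",
--     0xFF: "GAS_GCOMM_L2_STATE_NULL",
-- }
--
-- GAS_GCOMM_L2_FDD_MEAS_STATE_ENUM_TABLE = {
--     0x1: "GAS_GCOMM_L2_STATE_FDD_MEAS_STARTUP_WRRC",
--     0x2: "GAS_GCOMM_L2_STATE_FDD_MEAS_STARTUP_GPHY",
--     0x3: "GAS_GCOMM_L2_STATE_FDD_MEAS_WAIT_WRRC_MEAS_IND",
--     0x4: "GAS_GCOMM_L2_STATE_FDD_MEAS_READY_TO_RELEASE",
--     0x5: "GAS_GCOMM_L2_STATE_FDD_MEAS_RELEASE_GPHY",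
--     0x6: "GAS_GCOMM_L2_STATE_FDD_MEAS_RELEASE_WRRC",
-- }
--
-- GAS_GCOMM_L2_TDS_MEAS_STATE_ENUM_TABLE = {
--     0x1: "GAS_GCOMM_L2_STATE_TDS_MEAS_STARTUP_TRRC",
--     0x2: "GAS_GCOMM_L2_STATE_TDS_MEAS_STARTUP_GPHY",
--     0x3: "GAS_GCOMM_L2_STATE_TDS_MEAS_WAIT_TRRC_MEAS_IND",
--     0x4: "GAS_GCOMM_L2_STATE_TDS_MEAS_READY_TO_RELEASE",
--     0x5: "GAS_GCOMM_L2_STATE_TDS_MEAS_RELEASE_GPHY",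
--     0x6: "GAS_GCOMM_L2_STATE_TDS_MEAS_RELEASE_TRRC",
-- }
--
-- def get_gcomm_l2_state(fsm, state):
--     if MACRO_GCOMM_FSM_L2_FDD_MEAS_INDEX == fsm:
--         for index in GAS_GCOMM_L2_FDD_MEAS_STATE_ENUM_TABLE.keys():
--             if index == state:
--                 return GAS_GCOMM_L2_FDD_MEAS_STATE_ENUM_TABLE[index]
--     elif MACRO_GCOMM_FSM_L2_TDD_MEAS_INDEX == fsm:
--         for index in GAS_GCOMM_L2_TDS_MEAS_STATE_ENUM_TABLE.keys():
--             if index == state: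
--                 return GAS_GCOMM_L2_TDS_MEAS_STATE_ENUM_TABLE[index]
--     else:
--         for index in GAS_GCOMM_L2_STATE_ENUM_TABLE.keys():
--             if index == state:
--                 return GAS_GCOMM_L2_STATE_ENUM_TABLE[index]
--
--     return GAS_GCOMM_L2_STATE_ENUM_TABLE[MACRO_GCOMM_FSM_L2_STATUS_BUTT_INDEX]
-- ===== SOURCE B (Python) =====
-- _PREFIX = "GAS_GCOMM_L2_STATE_"
--
-- # Per-state tails for the FDD/TDS measurement FSMs; {RRC} is the RAT's RRC module.
-- _MEAS_TAILS = ["STARTUP_{RRC}", "STARTUP_GPHY", "WAIT_{RRC}_MEAS_IND",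
--                "READY_TO_RELEASE", "RELEASE_GPHY", "RELEASE_{RRC}"]
--
-- # Per-low-nibble tails for the LTE idle/connected measurement states (0x2x / 0x3x).
-- _LTE_TAILS = ["WAIT_LRRC_MEAS_CNF", "WAIT_GPHY_MEAS_CNF", "WAIT_LRRC_MEAS_IND",
--               "WAIT_MEAS_PT_EXP", "WAIT_GPHY_STOP_MEAS_CNF", "WAIT_LRRC_STOP_MEAS_CNF"]
--
-- def get_gcomm_l2_state(fsm, state):
--     if fsm == 0x3 or fsm == 0x2:
--         if 1 <= state <= 6:
--             rat, rrc = ("FDD", "WRRC") if fsm == 0x3 else ("TDS", "TRRC")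
--             return _PREFIX + rat + "_MEAS_" + _MEAS_TAILS[state - 1].replace("{RRC}", rrc)
--     elif state == 0xFE:
--         return _PREFIX + "INIT"
--     else:
--         hi, lo = divmod(state, 16)
--         if (hi == 0x2 or hi == 0x3) and 1 <= lo <= 6:
--             mode = "IDLE" if hi == 0x2 else "CONNECT"
--             return _PREFIX + "LTE_" + mode + "_MEAS_" + _LTE_TAILS[lo - 1]
--     return _PREFIX + "NULL"
-- ===== Notes on version B (the rewrite author's own statement) =====
-- stated objective: alternative
-- what changed: Replaces the three lookup tables and key-scanning loops entirely: B decodes the numeric structure of the state code (divmod by 16 for the LTE table's high/low nibble, direct 1..6 index for the FDD/TDS FSMs) and synthesizes the state name from shared string fragments.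
import Mathlib
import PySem

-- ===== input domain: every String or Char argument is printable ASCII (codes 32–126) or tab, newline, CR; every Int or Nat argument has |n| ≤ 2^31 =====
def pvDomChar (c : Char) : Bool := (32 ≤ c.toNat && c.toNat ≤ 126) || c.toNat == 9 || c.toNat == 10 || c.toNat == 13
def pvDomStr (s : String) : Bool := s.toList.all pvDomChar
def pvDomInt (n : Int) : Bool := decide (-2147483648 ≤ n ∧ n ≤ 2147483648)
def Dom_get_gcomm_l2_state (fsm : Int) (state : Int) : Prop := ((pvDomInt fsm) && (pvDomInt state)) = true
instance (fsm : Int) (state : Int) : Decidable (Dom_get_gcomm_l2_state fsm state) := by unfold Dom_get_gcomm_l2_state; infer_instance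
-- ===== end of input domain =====

-- B drops all three lookup tables: it decodes the state code's numeric structure
-- (high/low nibble for the LTE table, 1..6 index for the FDD/TDS ones) and
-- synthesizes the name string from shared fragments (alternative decomposition).

-- ===== PORT A =====
def GAS_GCOMM_L2_STATE_ENUM_TABLE : PySem.Dict Int String := PySem.Dict.ofList [
  (0x21, "GAS_GCOMM_L2_STATE_LTE_IDLE_MEAS_WAIT_LRRC_MEAS_CNF"),
  (0x22, "GAS_GCOMM_L2_STATE_LTE_IDLE_MEAS_WAIT_GPHY_MEAS_CNF"),
  (0x23, "GAS_GCOMM_L2_STATE_LTE_IDLE_MEAS_WAIT_LRRC_MEAS_IND"),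
  (0x24, "GAS_GCOMM_L2_STATE_LTE_IDLE_MEAS_WAIT_MEAS_PT_EXP"),
  (0x25, "GAS_GCOMM_L2_STATE_LTE_IDLE_MEAS_WAIT_GPHY_STOP_MEAS_CNF"),
  (0x26, "GAS_GCOMM_L2_STATE_LTE_IDLE_MEAS_WAIT_LRRC_STOP_MEAS_CNF"),
  (0x31, "GAS_GCOMM_L2_STATE_LTE_CONNECT_MEAS_WAIT_LRRC_MEAS_CNF"),
  (0x32, "GAS_GCOMM_L2_STATE_LTE_CONNECT_MEAS_WAIT_GPHY_MEAS_CNF"),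
  (0x33, "GAS_GCOMM_L2_STATE_LTE_CONNECT_MEAS_WAIT_LRRC_MEAS_IND"),
  (0x34, "GAS_GCOMM_L2_STATE_LTE_CONNECT_MEAS_WAIT_MEAS_PT_EXP"),
  (0x35, "GAS_GCOMM_L2_STATE_LTE_CONNECT_MEAS_WAIT_GPHY_STOP_MEAS_CNF"),
  (0x36, "GAS_GCOMM_L2_STATE_LTE_CONNECT_MEAS_WAIT_LRRC_STOP_MEAS_CNF"),
  (0xFE, "GAS_GCOMM_L2_STATE_INIT"),
  (0xFF, "GAS_GCOMM_L2_STATE_NULL")]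

def GAS_GCOMM_L2_FDD_MEAS_STATE_ENUM_TABLE : PySem.Dict Int String := PySem.Dict.ofList [
  (0x1, "GAS_GCOMM_L2_STATE_FDD_MEAS_STARTUP_WRRC"),
  (0x2, "GAS_GCOMM_L2_STATE_FDD_MEAS_STARTUP_GPHY"),
  (0x3, "GAS_GCOMM_L2_STATE_FDD_MEAS_WAIT_WRRC_MEAS_IND"),
  (0x4, "GAS_GCOMM_L2_STATE_FDD_MEAS_READY_TO_RELEASE"),
  (0x5, "GAS_GCOMM_L2_STATE_FDD_MEAS_RELEASE_GPHY"),
  (0x6, "GAS_GCOMM_L2_STATE_FDD_MEAS_RELEASE_WRRC")]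

def GAS_GCOMM_L2_TDS_MEAS_STATE_ENUM_TABLE : PySem.Dict Int String := PySem.Dict.ofList [
  (0x1, "GAS_GCOMM_L2_STATE_TDS_MEAS_STARTUP_TRRC"),
  (0x2, "GAS_GCOMM_L2_STATE_TDS_MEAS_STARTUP_GPHY"),
  (0x3, "GAS_GCOMM_L2_STATE_TDS_MEAS_WAIT_TRRC_MEAS_IND"),
  (0x4, "GAS_GCOMM_L2_STATE_TDS_MEAS_READY_TO_RELEASE"),
  (0x5, "GAS_GCOMM_L2_STATE_TDS_MEAS_RELEASE_GPHY"),
  (0x6, "GAS_GCOMM_L2_STATE_TDS_MEAS_RELEASE_TRRC")]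

-- A's 'for index in table.keys(): if index == state: return table[index]'
-- (table[index] is exact as get? here: index is drawn from table's own keys, so get? is some)
def pyScanLoop (d : PySem.Dict Int String) (state : Int) : Option String :=
  d.keys.findSome? (fun index => if index == state then d.get? index else none)

def get_gcomm_l2_state (fsm : Int) (state : Int) : String :=
  -- 'return GAS_GCOMM_L2_STATE_ENUM_TABLE[0xFF]' fall-through: key 0xFF is present, getD "" is exact
  let fallthrough := (GAS_GCOMM_L2_STATE_ENUM_TABLE.get? 0xFF).getD ""
  if (0x3 : Int) == fsm then
    (pyScanLoop GAS_GCOMM_L2_FDD_MEAS_STATE_ENUM_TABLE state).getD fallthrough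
  else if (0x2 : Int) == fsm then
    (pyScanLoop GAS_GCOMM_L2_TDS_MEAS_STATE_ENUM_TABLE state).getD fallthrough
  else
    (pyScanLoop GAS_GCOMM_L2_STATE_ENUM_TABLE state).getD fallthrough

-- ===== PORT B =====
def GCOMM_PREFIX : String := "GAS_GCOMM_L2_STATE_"

def GCOMM_MEAS_TAILS : List String :=
  ["STARTUP_{RRC}", "STARTUP_GPHY", "WAIT_{RRC}_MEAS_IND",
   "READY_TO_RELEASE", "RELEASE_GPHY", "RELEASE_{RRC}"]

def GCOMM_LTE_TAILS : List String :=
  ["WAIT_LRRC_MEAS_CNF", "WAIT_GPHY_MEAS_CNF", "WAIT_LRRC_MEAS_IND",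
   "WAIT_MEAS_PT_EXP", "WAIT_GPHY_STOP_MEAS_CNF", "WAIT_LRRC_STOP_MEAS_CNF"]

def get_gcomm_l2_state_alt (fsm : Int) (state : Int) : String :=
  if fsm == 0x3 || fsm == 0x2 then
    if 1 ≤ state ∧ state ≤ 6 then
      -- _MEAS_TAILS[state - 1]: index is in range here, so pyGet?/getD "" is exact
      let rat := if fsm == 0x3 then "FDD" else "TDS"
      let rrc := if fsm == 0x3 then "WRRC" else "TRRC"
      GCOMM_PREFIX ++ rat ++ "_MEAS_" ++
        PySem.Str.replace ((PySem.List.pyGet? GCOMM_MEAS_TAILS (state - 1)).getD "") "{RRC}" rrc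
    else GCOMM_PREFIX ++ "NULL"
  else if state == 0xFE then GCOMM_PREFIX ++ "INIT"
  else
    -- hi, lo = divmod(state, 16)
    let hi := PySem.Int.floordiv state 16
    let lo := PySem.Int.mod state 16
    if (hi == 0x2 || hi == 0x3) && decide (1 ≤ lo ∧ lo ≤ 6) then
      let mode := if hi == 0x2 then "IDLE" else "CONNECT"
      GCOMM_PREFIX ++ "LTE_" ++ mode ++ "_MEAS_" ++
        (PySem.List.pyGet? GCOMM_LTE_TAILS (lo - 1)).getD ""
    else GCOMM_PREFIX ++ "NULL"

-- ===== PRECONDITION & SPEC =====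
def Spec_get_gcomm_l2_state (fsm : Int) (state : Int) (out : String) : Prop := out = get_gcomm_l2_state_alt fsm state
instance (fsm : Int) (state : Int) (out : String) : Decidable (Spec_get_gcomm_l2_state fsm state out) := by unfold Spec_get_gcomm_l2_state; infer_instance

-- ===== CLAIM (what is proved, stated in full; the proofs are below) =====
def Claim_equal_get_gcomm_l2_state : Prop := ∀ (fsm : Int) (state : Int), Dom_get_gcomm_l2_state fsm state → Spec_get_gcomm_l2_state fsm state (get_gcomm_l2_state fsm state)

-- ===== LEMMAS AND PROOFS =====

-- A's key-scan loop misses when state is none of the table's keys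
theorem scan_none (d : PySem.Dict Int String) (state : Int)
    (h : ∀ k ∈ d.keys, k ≠ state) : pyScanLoop d state = none := by
  unfold pyScanLoop
  rw [List.findSome?_eq_none_iff]
  intro k hk
  simp [h k hk]

theorem fdd_keys : GAS_GCOMM_L2_FDD_MEAS_STATE_ENUM_TABLE.keys = [1, 2, 3, 4, 5, 6] := by decide

theorem tds_keys : GAS_GCOMM_L2_TDS_MEAS_STATE_ENUM_TABLE.keys = [1, 2, 3, 4, 5, 6] := by decide

theorem base_keys : GAS_GCOMM_L2_STATE_ENUM_TABLE.keys =
    [0x21, 0x22, 0x23, 0x24, 0x25, 0x26, 0x31, 0x32, 0x33, 0x34, 0x35, 0x36, 0xFE, 0xFF] := by decide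

-- ===== VERDICT (by name: the statement is the Claim_ definition above) =====
theorem get_gcomm_l2_state_spec : Claim_equal_get_gcomm_l2_state := by
  intro fsm state _
  unfold Spec_get_gcomm_l2_state
  by_cases h3 : fsm = 3
  · subst h3
    by_cases hs : 1 ≤ state ∧ state ≤ 6
    · obtain ⟨h1, h2⟩ := hs
      interval_cases state <;> decide
    · have hne : ∀ k ∈ GAS_GCOMM_L2_FDD_MEAS_STATE_ENUM_TABLE.keys, k ≠ state := by
        rw [fdd_keys]; intro k hk; fin_cases hk <;> omega
      unfold get_gcomm_l2_state get_gcomm_l2_state_alt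
      rw [scan_none _ _ hne]
      simp [hs]
      decide
  · by_cases h2 : fsm = 2
    · subst h2
      by_cases hs : 1 ≤ state ∧ state ≤ 6
      · obtain ⟨ha, hb⟩ := hs
        interval_cases state <;> decide
      · have hne : ∀ k ∈ GAS_GCOMM_L2_TDS_MEAS_STATE_ENUM_TABLE.keys, k ≠ state := by
          rw [tds_keys]; intro k hk; fin_cases hk <;> omega
        unfold get_gcomm_l2_state get_gcomm_l2_state_alt
        rw [scan_none _ _ hne]
        simp [hs, show ((3 : Int) == 2) = false by decide]
        decide
    · have e3 : ((3 : Int) == fsm) = false := by simp [Ne.symm h3]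
      have e2 : ((2 : Int) == fsm) = false := by simp [Ne.symm h2]
      have f3 : (fsm == (3 : Int)) = false := by simp [h3]
      have f2 : (fsm == (2 : Int)) = false := by simp [h2]
      unfold get_gcomm_l2_state get_gcomm_l2_state_alt
      simp only [e3, e2, f3, f2, Bool.false_eq_true, if_false, Bool.or_self]
      -- both sides now depend on state only
      have hfd : PySem.Int.floordiv state 16 = state / 16 :=
        PySem.Int.floordiv_eq_ediv_of_pos (by omega)
      have hmd : PySem.Int.mod state 16 = state % 16 :=
        PySem.Int.mod_eq_emod_of_pos (by omega)
      by_cases hcond : (state / 16 = 2 ∨ state / 16 = 3) ∧ 1 ≤ state % 16 ∧ state % 16 ≤ 6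
      · have : state = 0x21 ∨ state = 0x22 ∨ state = 0x23 ∨ state = 0x24 ∨ state = 0x25 ∨
            state = 0x26 ∨ state = 0x31 ∨ state = 0x32 ∨ state = 0x33 ∨ state = 0x34 ∨
            state = 0x35 ∨ state = 0x36 := by omega
        rcases this with h|h|h|h|h|h|h|h|h|h|h|h <;> subst h <;> decide
      · by_cases hfe : state = 0xFE
        · subst hfe; decide
        · by_cases hff : state = 0xFF
          · subst hff; decide
          · have hne : ∀ k ∈ GAS_GCOMM_L2_STATE_ENUM_TABLE.keys, k ≠ state := by
              rw [base_keys]; intro k hk; fin_cases hk <;> omega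
            rw [scan_none _ _ hne]
            have hgf : ((PySem.Int.floordiv state 16 == (2:Int) || PySem.Int.floordiv state 16 == (3:Int)) &&
                decide (1 ≤ PySem.Int.mod state 16 ∧ PySem.Int.mod state 16 ≤ 6)) = false := by
              rw [hfd, hmd]
              simp only [Bool.and_eq_false_iff, Bool.or_eq_false_iff, beq_eq_false_iff_ne,
                decide_eq_false_iff_not]
              omega
            simp only [show (state == (0xFE:Int)) = false by simp [hfe], Bool.false_eq_true, if_false]
            rw [hgf]
            simp only [Bool.false_eq_true, if_false]
            decide
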